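-- pv_equiv track=rewrite | github.com/1ssb/question_me_hard | question_me_hard/subagent.py | _parse_contract
-- ===== SOURCE A (Python) =====
-- from typing import Callable, Dict, List, Optional
--
-- _CONTRACT_SECTIONS = (
--     "FUNCTION_SIGNATURE",
--     "DOCSTRING",
--     "EXAMPLES",
--     "TEST_CASES",
--     "ERROR_HANDLING",
-- )
--
-- def _parse_contract(response: str) -> Dict[str, str]:
--     """Parse a structured contract response from the LLM into a plain dict.
--
--     Recognises the five canonical section headers (FUNCTION_SIGNATURE,
--     DOCSTRING, EXAMPLES, TEST_CASES, ERROR_HANDLING) and collects all lines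
--     that follow each header until the next header (or end of string).
--
--     Args:
--         response: Raw LLM response containing the labelled sections.
--
--     Returns:
--         A dict with keys ``function_signature``, ``docstring``, ``examples``,
--         ``test_cases``, ``error_handling``; values default to ``""`` for any
--         section not found in *response*.
--     """
--     result: Dict[str, str] = {s.lower(): "" for s in _CONTRACT_SECTIONS}
--     current: Optional[str] = None
--     pending: List[str] = []
--
--     for line in response.splitlines():
--         matched = False
--         for section in _CONTRACT_SECTIONS:
--             if line.upper().startswith(section + ":"):
--                 if current is not None:
--                     result[current] = "\n".join(pending).strip()
--                 current = section.lower()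
--                 rest = line[len(section) + 1 :].strip()
--                 pending = [rest] if rest else []
--                 matched = True
--                 break
--         if not matched and current is not None:
--             pending.append(line)
--
--     if current is not None:
--         result[current] = "\n".join(pending).strip()
--
--     return result
-- ===== SOURCE B (Python) =====
-- from typing import Dict, List, Optional, Tuple
--
-- _CONTRACT_SECTIONS = (
--     "FUNCTION_SIGNATURE",
--     "DOCSTRING",
--     "EXAMPLES",
--     "TEST_CASES",
--     "ERROR_HANDLING",
-- )
--
--
-- def _header(line: str) -> Optional[Tuple[str, str]]:
--     """Return (section_lower, stripped inline rest) if *line* is a header, else None."""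
--     u = line.upper()
--     for section in _CONTRACT_SECTIONS:
--         if u.startswith(section + ":"):
--             return section.lower(), line[len(section) + 1:].strip()
--     return None
--
--
-- def _parse_contract(response: str) -> Dict[str, str]:
--     result: Dict[str, str] = {s.lower(): "" for s in _CONTRACT_SECTIONS}
--     lines = response.splitlines()
--     # ignore everything before the first header
--     while lines and _header(lines[0]) is None:
--         lines = lines[1:]
--     # each iteration consumes one header and its whole body segment
--     while lines:
--         sec, rest = _header(lines[0])
--         body: List[str] = []
--         k = 1
--         while k < len(lines) and _header(lines[k]) is None:
--             body.append(lines[k])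
--             k += 1
--         if rest:
--             body.insert(0, rest)
--         result[sec] = "\n".join(body).strip()
--         lines = lines[k:]
--     return result
-- ===== Notes on version B (the rewrite author's own statement) =====
-- stated objective: alternative
-- what changed: Replaces A's single-pass accumulator automaton (current/pending state threaded through every line, with flushes at each new header and at EOF) by a segment-at-a-time consumer: skip the preamble, then repeatedly take one header plus its whole body span and assign it in one step, with no pending state or end-of-input flush.
import Mathlib
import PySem

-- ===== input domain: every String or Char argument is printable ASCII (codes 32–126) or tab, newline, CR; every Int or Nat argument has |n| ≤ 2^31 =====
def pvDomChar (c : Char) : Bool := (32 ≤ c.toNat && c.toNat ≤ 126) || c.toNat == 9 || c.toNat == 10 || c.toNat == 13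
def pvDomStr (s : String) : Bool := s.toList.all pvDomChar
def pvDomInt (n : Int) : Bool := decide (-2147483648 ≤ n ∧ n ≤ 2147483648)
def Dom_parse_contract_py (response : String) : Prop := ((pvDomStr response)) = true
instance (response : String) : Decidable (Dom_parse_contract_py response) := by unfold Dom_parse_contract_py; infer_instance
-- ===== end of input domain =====

-- B replaces A's line-by-line accumulator automaton (current/pending state, flush at each new
-- header and at EOF) by a segment-at-a-time consumer: skip the preamble, then repeatedly take one
-- header and its whole body span and assign it in one step; objective: alternative decomposition.

def pvSections : List String :=
  ["FUNCTION_SIGNATURE", "DOCSTRING", "EXAMPLES", "TEST_CASES", "ERROR_HANDLING"]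

-- ===== PORT A =====
-- A's inner 'for section … if …: …; break' acts only on the FIRST matching section: ported as find?.
def pvStepA (st : PySem.Dict String String × Option String × List String) (line : String) :
    PySem.Dict String String × Option String × List String :=
  match pvSections.find? (fun s => PySem.Str.startswith (PySem.Str.upper line) (s ++ ":")) with
  | some sec0 =>
    let res :=
      match st.2.1 with
      | some c => st.1.insert c (PySem.Str.strip (PySem.Str.join "\n" st.2.2))
      | none => st.1
    let rest := PySem.Str.strip (PySem.Str.slice line (some ((PySem.Str.len sec0 : Int) + 1)) none)
    (res, some (PySem.Str.lower sec0), if rest ≠ "" then [rest] else [])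
  | none =>
    match st.2.1 with
    | some _ => (st.1, st.2.1, st.2.2 ++ [line])
    | none => st

def parse_contract_py (response : String) : List (String × String) :=
  let init := pvSections.foldl (fun d s => d.insert (PySem.Str.lower s) "") PySem.Dict.empty
  let fin := (PySem.Str.splitlines response).foldl pvStepA (init, none, [])
  (match fin.2.1 with
   | some c => fin.1.insert c (PySem.Str.strip (PySem.Str.join "\n" fin.2.2))
   | none => fin.1).items

-- ===== PORT B =====
def pvHeader (line : String) : Option (String × String) :=
  match pvSections.find? (fun s => PySem.Str.startswith (PySem.Str.upper line) (s ++ ":")) with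
  | some sec0 =>
    some (PySem.Str.lower sec0,
      PySem.Str.strip (PySem.Str.slice line (some ((PySem.Str.len sec0 : Int) + 1)) none))
  | none => none

-- the segment loop: lines starts at a header (or is empty); consumes header + body span per step
def pvLoopB (res : PySem.Dict String String) (lines : List String) : PySem.Dict String String :=
  match lines with
  | [] => res
  | l :: t =>
    match pvHeader l with
    | some (sec, rest) =>
      let body := t.takeWhile (fun x => (pvHeader x).isNone)
      let body' := if rest ≠ "" then rest :: body else body
      pvLoopB (res.insert sec (PySem.Str.strip (PySem.Str.join "\n" body')))
        (t.dropWhile (fun x => (pvHeader x).isNone))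
    | none => res   -- unreachable: the loop is only entered at a header line
termination_by lines.length
decreasing_by
  simp only [List.length_cons]
  exact Nat.lt_succ_of_le (List.length_dropWhile_le _ _)

def parse_contract_py_alt (response : String) : List (String × String) :=
  let init := pvSections.foldl (fun d s => d.insert (PySem.Str.lower s) "") PySem.Dict.empty
  let lines := (PySem.Str.splitlines response).dropWhile (fun x => (pvHeader x).isNone)
  (pvLoopB init lines).items

-- ===== PRECONDITION & SPEC =====
def Spec_parse_contract_py (response : String) (out : List (String × String)) : Prop := out = parse_contract_py_alt response
instance (response : String) (out : List (String × String)) : Decidable (Spec_parse_contract_py response out) := by unfold Spec_parse_contract_py; infer_instance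

-- ===== CLAIM (what is proved, stated in full; the proofs are below) =====
def Claim_equal_parse_contract_py : Prop := ∀ (response : String), Dom_parse_contract_py response → Spec_parse_contract_py response (parse_contract_py response)

-- ===== LEMMAS AND PROOFS =====

-- one-step unfolding of pvLoopB at a header line
theorem pvLoopB_cons_header (res : PySem.Dict String String) (l : String) (t : List String)
    (sec rest : String) (h : pvHeader l = some (sec, rest)) :
    pvLoopB res (l :: t) =
      pvLoopB
        (res.insert sec (PySem.Str.strip (PySem.Str.join "\n"
          (if rest ≠ "" then rest :: t.takeWhile (fun x => (pvHeader x).isNone)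
           else t.takeWhile (fun x => (pvHeader x).isNone)))))
        (t.dropWhile (fun x => (pvHeader x).isNone)) := by
  rw [pvLoopB, h]

-- skipping phase: a non-header line with no current section is a no-op for A
theorem pvFoldA_dropWhile (lines : List String) (res : PySem.Dict String String) :
    lines.foldl pvStepA (res, none, []) =
      (lines.dropWhile (fun x => (pvHeader x).isNone)).foldl pvStepA (res, none, []) := by
  induction lines with
  | nil => rfl
  | cons l t ih =>
    by_cases h : (pvHeader l).isNone
    · have hstep : pvStepA (res, none, []) l = (res, none, []) := by
        unfold pvStepA
        unfold pvHeader at h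
        cases hf : pvSections.find? (fun s => PySem.Str.startswith (PySem.Str.upper l) (s ++ ":")) with
        | none => simp
        | some s => rw [hf] at h; simp at h
      simp only [List.foldl_cons, hstep, List.dropWhile_cons, h]
      simpa using ih
    · simp only [List.dropWhile_cons, h, List.foldl_cons]
      simp at h
      rfl

-- main invariant: from state (res, some c, p), A flushes p ++ (body span) into c at the next
-- header (or EOF); that is exactly one pvLoopB step with the pending prefix pre-inserted
theorem pvFoldA_eq_loopB (lines : List String) (res : PySem.Dict String String)
    (c : String) (p : List String) :
    (match (lines.foldl pvStepA (res, some c, p)).2.1 with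
     | some c' => (lines.foldl pvStepA (res, some c, p)).1.insert c'
         (PySem.Str.strip (PySem.Str.join "\n" (lines.foldl pvStepA (res, some c, p)).2.2))
     | none => (lines.foldl pvStepA (res, some c, p)).1) =
      pvLoopB
        (res.insert c (PySem.Str.strip (PySem.Str.join "\n"
          (p ++ lines.takeWhile (fun x => (pvHeader x).isNone)))))
        (lines.dropWhile (fun x => (pvHeader x).isNone)) := by
  induction lines generalizing res c p with
  | nil => simp [pvLoopB]
  | cons l t ih =>
    cases hf : pvHeader l with
    | none =>
      have hn : (pvHeader l).isNone = true := by simp [hf]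
      have hstep : pvStepA (res, some c, p) l = (res, some c, p ++ [l]) := by
        unfold pvStepA
        unfold pvHeader at hf
        cases hf2 : pvSections.find? (fun s => PySem.Str.startswith (PySem.Str.upper l) (s ++ ":")) with
        | none => simp
        | some s => rw [hf2] at hf; simp at hf
      simp only [List.foldl_cons, hstep, List.dropWhile_cons, List.takeWhile_cons, hn]
      rw [ih]
      simp
    | some pr =>
      obtain ⟨sec, rest⟩ := pr
      have hn : (pvHeader l).isNone = false := by simp [hf]
      have hstep : pvStepA (res, some c, p) l =
          (res.insert c (PySem.Str.strip (PySem.Str.join "\n" p)), some sec,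
            if rest ≠ "" then [rest] else []) := by
        unfold pvStepA
        unfold pvHeader at hf
        cases hf2 : pvSections.find? (fun s => PySem.Str.startswith (PySem.Str.upper l) (s ++ ":")) with
        | none => rw [hf2] at hf; simp at hf
        | some s =>
          rw [hf2] at hf
          simp only [Option.some.injEq, Prod.mk.injEq] at hf
          simp [← hf.1, ← hf.2]
      simp only [List.foldl_cons, hstep, List.dropWhile_cons, List.takeWhile_cons, hn,
        Bool.false_eq_true, if_false]
      rw [ih]
      conv_rhs => rw [pvLoopB_cons_header _ l t sec rest hf]
      simp only [List.append_nil]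
      have harg : ((if rest ≠ "" then [rest] else []) ++ t.takeWhile (fun x => (pvHeader x).isNone))
          = (if rest ≠ "" then rest :: t.takeWhile (fun x => (pvHeader x).isNone)
             else t.takeWhile (fun x => (pvHeader x).isNone)) := by
        by_cases h : rest = "" <;> simp [h]
      rw [harg]

-- ===== VERDICT (by name: the statement is the Claim_ definition above) =====
theorem parse_contract_py_spec : Claim_equal_parse_contract_py := by
  intro response _
  unfold Spec_parse_contract_py parse_contract_py parse_contract_py_alt
  simp only []
  congr 1
  rw [pvFoldA_dropWhile]
  cases hd : (PySem.Str.splitlines response).dropWhile (fun x => (pvHeader x).isNone) with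
  | nil => simp [pvLoopB]
  | cons l t =>
    have hl : (pvHeader l).isNone = false := by
      have h2 := List.head_dropWhile_not (fun x => (pvHeader x).isNone)
        (l := PySem.Str.splitlines response) (by simp [hd])
      simp only [hd, List.head_cons] at h2
      exact h2
    cases hf : pvHeader l with
    | none => simp [hf] at hl
    | some pr =>
      obtain ⟨sec, rest⟩ := pr
      have hstep : ∀ d : PySem.Dict String String, pvStepA (d, none, []) l =
          (d, some sec, if rest ≠ "" then [rest] else []) := by
        intro d
        unfold pvStepA
        unfold pvHeader at hf
        cases hf2 : pvSections.find? (fun s => PySem.Str.startswith (PySem.Str.upper l) (s ++ ":")) with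
        | none => rw [hf2] at hf; simp at hf
        | some s =>
          rw [hf2] at hf
          simp only [Option.some.injEq, Prod.mk.injEq] at hf
          simp [← hf.1, ← hf.2]
      rw [List.foldl_cons, hstep, pvFoldA_eq_loopB]
      conv_rhs => rw [pvLoopB_cons_header _ l t sec rest hf]
      have harg : ((if rest ≠ "" then [rest] else []) ++ t.takeWhile (fun x => (pvHeader x).isNone))
          = (if rest ≠ "" then rest :: t.takeWhile (fun x => (pvHeader x).isNone)
             else t.takeWhile (fun x => (pvHeader x).isNone)) := by
        by_cases h : rest = "" <;> simp [h]
      rw [harg]
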